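-- pv_equiv track=rewrite | github.com/alexander-nemirovskiy/s2r_mapping_ui | app/core/mapping_gen/TwoDMatrixOperations.py | getMaxScoreNelements
-- ===== SOURCE A (Python) =====
-- def getMaxScoreNelements(inputMatchList, sourceList,number):
--     finalList=[]
--     for searchEl in sourceList:
--         tmpl=[]
--         for i in inputMatchList:
--             if i[0]== searchEl:
--                 tmpl.append(i)
--         sortedlist = sorted(tmpl, key=lambda tmpl: tmpl[2], reverse=True)
--         finalList.extend(sortedlist[:number])
--     return finalList
-- ===== SOURCE B (Python) =====
-- def getMaxScoreNelements(inputMatchList, sourceList, number):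
--     groups = {}
--     for i in inputMatchList:
--         groups.setdefault(i[0], []).append(i)
--     finalList = []
--     for searchEl in sourceList:
--         sortedlist = sorted(groups.get(searchEl, []), key=lambda t: t[2], reverse=True)
--         finalList.extend(sortedlist[:number])
--     return finalList
-- ===== Notes on version B (the rewrite author's own statement) =====
-- stated objective: faster
-- what changed: B groups inputMatchList into a dict keyed by i[0] in one pass and then only sorts each looked-up group, instead of rescanning the whole match list for every source element.
import Mathlib
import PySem

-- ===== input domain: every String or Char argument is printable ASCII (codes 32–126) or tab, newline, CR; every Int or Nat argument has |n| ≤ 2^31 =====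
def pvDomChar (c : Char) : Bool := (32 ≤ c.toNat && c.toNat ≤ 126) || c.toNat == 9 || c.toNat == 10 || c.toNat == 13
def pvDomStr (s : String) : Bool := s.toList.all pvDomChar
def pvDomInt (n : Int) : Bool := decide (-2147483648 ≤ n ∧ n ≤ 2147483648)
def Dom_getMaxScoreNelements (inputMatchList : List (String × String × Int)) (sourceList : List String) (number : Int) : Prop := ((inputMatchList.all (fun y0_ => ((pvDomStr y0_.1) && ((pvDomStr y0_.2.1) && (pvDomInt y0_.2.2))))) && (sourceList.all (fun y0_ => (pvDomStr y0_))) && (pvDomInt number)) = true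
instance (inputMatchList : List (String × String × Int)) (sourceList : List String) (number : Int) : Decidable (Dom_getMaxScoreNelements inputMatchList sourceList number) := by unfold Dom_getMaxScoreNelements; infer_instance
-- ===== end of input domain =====

-- B builds a dict of matches keyed by source element in one pass, instead of rescanning the whole match list per source element (objective: faster).
-- ===== PORT A =====
def getMaxScoreNelements (inputMatchList : List (String × String × Int)) (sourceList : List String) (number : Int) : List (String × String × Int) :=
  sourceList.foldl (fun finalList searchEl =>
    let tmpl := inputMatchList.foldl (fun t i => if i.1 == searchEl then t ++ [i] else t) []
    let sortedlist := PySem.List.sorted tmpl (fun t => t.2.2) true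
    finalList ++ PySem.List.slice sortedlist none (some number)) []

-- ===== PORT B =====
def getMaxScoreNelements_alt (inputMatchList : List (String × String × Int)) (sourceList : List String) (number : Int) : List (String × String × Int) :=
  let groups : PySem.Dict String (List (String × String × Int)) :=
    inputMatchList.foldl (fun d i => d.modify i.1 [] (· ++ [i])) PySem.Dict.empty
  sourceList.foldl (fun finalList searchEl =>
    finalList ++ PySem.List.slice (PySem.List.sorted (groups.getD searchEl []) (fun t => t.2.2) true) none (some number)) []

-- ===== PRECONDITION & SPEC =====
def Spec_getMaxScoreNelements (inputMatchList : List (String × String × Int)) (sourceList : List String) (number : Int) (out : List (String × String × Int)) : Prop := out = getMaxScoreNelements_alt inputMatchList sourceList number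
instance (inputMatchList : List (String × String × Int)) (sourceList : List String) (number : Int) (out : List (String × String × Int)) : Decidable (Spec_getMaxScoreNelements inputMatchList sourceList number out) := by unfold Spec_getMaxScoreNelements; infer_instance

-- ===== CLAIM (what is proved, stated in full; the proofs are below) =====
def Claim_equal_getMaxScoreNelements : Prop := ∀ (inputMatchList : List (String × String × Int)) (sourceList : List String) (number : Int), Dom_getMaxScoreNelements inputMatchList sourceList number → Spec_getMaxScoreNelements inputMatchList sourceList number (getMaxScoreNelements inputMatchList sourceList number)

-- ===== LEMMAS AND PROOFS =====

-- The dict built by B's grouping loop, looked up at el, is exactly A's filtered sub-list for el.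
lemma pvGroup_getD (l : List (String × String × Int)) (el : String) :
    (l.foldl (fun d i => d.modify i.1 [] (· ++ [i])) PySem.Dict.empty).getD el []
      = l.foldl (fun t i => if i.1 == el then t ++ [i] else t) [] := by
  have hmap : l.foldl (fun d i => d.modify i.1 [] (· ++ [i])) PySem.Dict.empty
      = (l.map (fun i => (i.1, i))).foldl (fun d p => d.modify p.1 [] (· ++ [p.2])) PySem.Dict.empty := by
    rw [List.foldl_map]
  have hfilter := PySem.List.foldl_append_if
    (p := fun i : String × String × Int => i.1 == el) (f := id) (l := l) (acc := [])
  rw [hmap, PySem.Dict.getD_foldl_modify_append]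
  simp only [PySem.Dict.getD_empty, List.nil_append] at *
  rw [List.filter_map]
  simpa [Function.comp_def] using hfilter.symm

-- ===== VERDICT (by name: the statement is the Claim_ definition above) =====
theorem getMaxScoreNelements_spec : Claim_equal_getMaxScoreNelements := by
  intro inputMatchList sourceList number _
  unfold Spec_getMaxScoreNelements getMaxScoreNelements getMaxScoreNelements_alt
  simp only [pvGroup_getD]
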